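-- pv_equiv track=rewrite | github.com/leealmasy/web_scraper | scraper2.py | get_fallback_urls
-- ===== SOURCE A (Python) =====
-- def get_fallback_urls(search_term):
--     """Get fallback URLs based on search term categories"""
--     search_lower = search_term.lower()
--
--     # Technology/Programming terms
--     if any(term in search_lower for term in ['python', 'javascript', 'programming', 'coding', 'llm', 'ai', 'machine learning', 'software']):
--         return [
--             f"https://en.wikipedia.org/wiki/{search_term.replace(' ', '_')}",
--             "https://stackoverflow.com/search?q=" + search_term.replace(' ', '+'),
--             "https://github.com/search?q=" + search_term.replace(' ', '+'),
--             "https://docs.python.org/3/search.html?q=" + search_term.replace(' ', '+'),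
--             "https://developer.mozilla.org/en-US/search?q=" + search_term.replace(' ', '+'),
--             "https://www.reddit.com/search/?q=" + search_term.replace(' ', '+'),
--             "https://medium.com/search?q=" + search_term.replace(' ', '+'),
--             "https://dev.to/search?q=" + search_term.replace(' ', '+'),
--             "https://www.geeksforgeeks.org/" + search_term.replace(' ', '-'),
--             "https://towardsdatascience.com/search?q=" + search_term.replace(' ', '+'),
--             "https://www.kaggle.com/search?q=" + search_term.replace(' ', '+'),
--             "https://arxiv.org/search/?query=" + search_term.replace(' ', '+'),
--             "https://huggingface.co/search/full-text?q=" + search_term.replace(' ', '+'),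
--             "https://openai.com/search/?query=" + search_term.replace(' ', '+'),
--             "https://www.tensorflow.org/s/results?q=" + search_term.replace(' ', '+')
--         ]
--
--
--     # Food/Cooking terms
--     elif any(term in search_lower for term in ['recipe', 'cooking', 'food', 'apple', 'apples', 'cake', 'chicken', 'pasta']):
--         return [
--             f"https://en.wikipedia.org/wiki/{search_term.replace(' ', '_')}",
--             "https://www.allrecipes.com/search/results/?search=" + search_term.replace(' ', '+'),
--             "https://www.foodnetwork.com/search/" + search_term.replace(' ', '-'),
--             "https://www.epicurious.com/search/" + search_term.replace(' ', '%20'),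
--             "https://www.bbcgoodfood.com/search/recipes?query=" + search_term.replace(' ', '+'),
--             "https://www.delish.com/search/?q=" + search_term.replace(' ', '+'),
--             "https://www.taste.com.au/search?q=" + search_term.replace(' ', '+'),
--             "https://www.bonappetit.com/search?q=" + search_term.replace(' ', '+'),
--             "https://www.foodandwine.com/search?q=" + search_term.replace(' ', '+'),
--             "https://www.simplyrecipes.com/search?q=" + search_term.replace(' ', '+'),
--             "https://www.kitchn.com/search?q=" + search_term.replace(' ', '+'),
--             "https://www.seriouseats.com/search?q=" + search_term.replace(' ', '+'),
--             "https://www.marthastewart.com/search?q=" + search_term.replace(' ', '+'),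
--             "https://www.recipetineats.com/?s=" + search_term.replace(' ', '+'),
--             "https://www.tasteofhome.com/search/?q=" + search_term.replace(' ', '+')
--         ]
--
--     # Health/Medical terms
--     elif any(term in search_lower for term in ['health', 'medicine', 'disease', 'treatment', 'symptoms']):
--         return [
--             f"https://en.wikipedia.org/wiki/{search_term.replace(' ', '_')}",
--             "https://www.mayoclinic.org/search/search-results?q=" + search_term.replace(' ', '+'),
--             "https://www.webmd.com/search/search_results/default.aspx?query=" + search_term.replace(' ', '+'),
--             "https://medlineplus.gov/search/?query=" + search_term.replace(' ', '+'),
--             "https://www.healthline.com/search?q1=" + search_term.replace(' ', '+'),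
--             "https://www.medicalnewstoday.com/search?q=" + search_term.replace(' ', '+'),
--             "https://www.health.com/search?q=" + search_term.replace(' ', '+'),
--             "https://www.verywellhealth.com/search?q=" + search_term.replace(' ', '+'),
--             "https://www.nhs.uk/search/?q=" + search_term.replace(' ', '+'),
--             "https://www.drugs.com/search.php?searchterm=" + search_term.replace(' ', '+'),
--             "https://www.everydayhealth.com/search/?q=" + search_term.replace(' ', '+'),
--             "https://www.prevention.com/search/?q=" + search_term.replace(' ', '+'),
--             "https://www.womenshealthmag.com/search/?q=" + search_term.replace(' ', '+'),
--             "https://www.menshealth.com/search/?q=" + search_term.replace(' ', '+'),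
--             "https://www.healthcentral.com/search?q=" + search_term.replace(' ', '+')
--         ]
--
--     # General fallback
--     else:
--         return [
--             f"https://en.wikipedia.org/wiki/{search_term.replace(' ', '_')}",
--             f"https://www.britannica.com/search?query={search_term.replace(' ', '+')}",
--             f"https://www.reddit.com/search/?q={search_term.replace(' ', '+')}",
--             f"https://www.quora.com/search?q={search_term.replace(' ', '+')}",
--             f"https://medium.com/search?q={search_term.replace(' ', '+')}",
--             f"https://scholar.google.com/scholar?q={search_term.replace(' ', '+')}",
--             f"https://www.youtube.com/results?search_query={search_term.replace(' ', '+')}",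
--             f"https://www.coursera.org/search?query={search_term.replace(' ', '%20')}",
--             f"https://www.udemy.com/courses/search/?q={search_term.replace(' ', '+')}",
--             f"https://www.khanacademy.org/search?page_search_query={search_term.replace(' ', '+')}",
--             f"https://www.ted.com/search?q={search_term.replace(' ', '+')}",
--             f"https://www.investopedia.com/search?q={search_term.replace(' ', '+')}",
--             f"https://www.howstuffworks.com/search.php?terms={search_term.replace(' ', '+')}",
--             f"https://www.nationalgeographic.com/search?q={search_term.replace(' ', '+')}",
--             f"https://www.smithsonianmag.com/search/?q={search_term.replace(' ', '+')}"
--         ]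
-- ===== SOURCE B (Python) =====
-- # Different algorithm: instead of testing each keyword for substring containment,
-- # enumerate every window of the lowered search string (length-bounded) and look it up
-- # in a single keyword->category dict, keeping the minimum (= highest-priority) category;
-- # URLs are then built from one prefix table per category with the four space-substituted
-- # variants of the term computed once.
--
-- _KW2CAT = {
--     'python': 0, 'javascript': 0, 'programming': 0, 'coding': 0, 'llm': 0,
--     'ai': 0, 'machine learning': 0, 'software': 0,
--     'recipe': 1, 'cooking': 1, 'food': 1, 'apple': 1, 'apples': 1,
--     'cake': 1, 'chicken': 1, 'pasta': 1,
--     'health': 2, 'medicine': 2, 'disease': 2, 'treatment': 2, 'symptoms': 2,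
-- }
-- _MAXKW = 16  # longest keyword: 'machine learning'
--
-- # per-category tables: (url_prefix, space-substitution key); the search term always ends the URL
-- _TABLES = [
--     [  # 0: technology
--         ("https://en.wikipedia.org/wiki/", "_"),
--         ("https://stackoverflow.com/search?q=", "+"),
--         ("https://github.com/search?q=", "+"),
--         ("https://docs.python.org/3/search.html?q=", "+"),
--         ("https://developer.mozilla.org/en-US/search?q=", "+"),
--         ("https://www.reddit.com/search/?q=", "+"),
--         ("https://medium.com/search?q=", "+"),
--         ("https://dev.to/search?q=", "+"),
--         ("https://www.geeksforgeeks.org/", "-"),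
--         ("https://towardsdatascience.com/search?q=", "+"),
--         ("https://www.kaggle.com/search?q=", "+"),
--         ("https://arxiv.org/search/?query=", "+"),
--         ("https://huggingface.co/search/full-text?q=", "+"),
--         ("https://openai.com/search/?query=", "+"),
--         ("https://www.tensorflow.org/s/results?q=", "+"),
--     ],
--     [  # 1: food
--         ("https://en.wikipedia.org/wiki/", "_"),
--         ("https://www.allrecipes.com/search/results/?search=", "+"),
--         ("https://www.foodnetwork.com/search/", "-"),
--         ("https://www.epicurious.com/search/", "%20"),
--         ("https://www.bbcgoodfood.com/search/recipes?query=", "+"),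
--         ("https://www.delish.com/search/?q=", "+"),
--         ("https://www.taste.com.au/search?q=", "+"),
--         ("https://www.bonappetit.com/search?q=", "+"),
--         ("https://www.foodandwine.com/search?q=", "+"),
--         ("https://www.simplyrecipes.com/search?q=", "+"),
--         ("https://www.kitchn.com/search?q=", "+"),
--         ("https://www.seriouseats.com/search?q=", "+"),
--         ("https://www.marthastewart.com/search?q=", "+"),
--         ("https://www.recipetineats.com/?s=", "+"),
--         ("https://www.tasteofhome.com/search/?q=", "+"),
--     ],
--     [  # 2: health
--         ("https://en.wikipedia.org/wiki/", "_"),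
--         ("https://www.mayoclinic.org/search/search-results?q=", "+"),
--         ("https://www.webmd.com/search/search_results/default.aspx?query=", "+"),
--         ("https://medlineplus.gov/search/?query=", "+"),
--         ("https://www.healthline.com/search?q1=", "+"),
--         ("https://www.medicalnewstoday.com/search?q=", "+"),
--         ("https://www.health.com/search?q=", "+"),
--         ("https://www.verywellhealth.com/search?q=", "+"),
--         ("https://www.nhs.uk/search/?q=", "+"),
--         ("https://www.drugs.com/search.php?searchterm=", "+"),
--         ("https://www.everydayhealth.com/search/?q=", "+"),
--         ("https://www.prevention.com/search/?q=", "+"),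
--         ("https://www.womenshealthmag.com/search/?q=", "+"),
--         ("https://www.menshealth.com/search/?q=", "+"),
--         ("https://www.healthcentral.com/search?q=", "+"),
--     ],
--     [  # 3: general fallback
--         ("https://en.wikipedia.org/wiki/", "_"),
--         ("https://www.britannica.com/search?query=", "+"),
--         ("https://www.reddit.com/search/?q=", "+"),
--         ("https://www.quora.com/search?q=", "+"),
--         ("https://medium.com/search?q=", "+"),
--         ("https://scholar.google.com/scholar?q=", "+"),
--         ("https://www.youtube.com/results?search_query=", "+"),
--         ("https://www.coursera.org/search?query=", "%20"),
--         ("https://www.udemy.com/courses/search/?q=", "+"),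
--         ("https://www.khanacademy.org/search?page_search_query=", "+"),
--         ("https://www.ted.com/search?q=", "+"),
--         ("https://www.investopedia.com/search?q=", "+"),
--         ("https://www.howstuffworks.com/search.php?terms=", "+"),
--         ("https://www.nationalgeographic.com/search?q=", "+"),
--         ("https://www.smithsonianmag.com/search/?q=", "+"),
--     ],
-- ]
--
--
-- def get_fallback_urls(search_term):
--     sl = search_term.lower()
--     cat = 3
--     for i in range(len(sl)):
--         for j in range(i + 1, min(i + _MAXKW, len(sl)) + 1):
--             c = _KW2CAT.get(sl[i:j])
--             if c is not None:
--                 cat = min(cat, c)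
--     variants = {
--         '_': search_term.replace(' ', '_'),
--         '+': search_term.replace(' ', '+'),
--         '-': search_term.replace(' ', '-'),
--         '%20': search_term.replace(' ', '%20'),
--     }
--     return [prefix + variants[key] for prefix, key in _TABLES[cat]]
-- ===== Notes on version B (the rewrite author's own statement) =====
-- stated objective: alternative
-- what changed: Category detection is inverted: instead of testing each hard-coded keyword for containment per branch, B enumerates every (length-bounded) window of the lowered search term, looks each window up in a single keyword-to-category dict, and keeps the minimum category index; the URL list is then built from a per-category prefix table using four precomputed space-substituted variants of the term.
import Mathlib
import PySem

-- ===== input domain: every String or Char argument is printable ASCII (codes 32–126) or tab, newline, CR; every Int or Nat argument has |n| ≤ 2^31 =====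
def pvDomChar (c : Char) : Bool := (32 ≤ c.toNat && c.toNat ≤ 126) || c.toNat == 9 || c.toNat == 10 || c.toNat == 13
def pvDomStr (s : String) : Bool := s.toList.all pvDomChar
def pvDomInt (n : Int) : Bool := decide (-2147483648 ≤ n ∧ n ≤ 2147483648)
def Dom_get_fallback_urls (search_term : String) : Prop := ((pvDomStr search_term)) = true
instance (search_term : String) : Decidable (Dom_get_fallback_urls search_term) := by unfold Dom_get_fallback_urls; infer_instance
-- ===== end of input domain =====

-- B detects the category by enumerating length-bounded windows of the lowered term and
-- looking them up in one keyword→category dict, keeping the minimum category index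
-- (objective: alternative algorithm, same cost class).

-- ===== PORT A =====
def get_fallback_urls (search_term : String) : List String :=
  let search_lower := PySem.Str.lower search_term
  if (["python", "javascript", "programming", "coding", "llm", "ai", "machine learning", "software"].any
      (fun term => PySem.Str.isIn term search_lower)) then
    [ "https://en.wikipedia.org/wiki/" ++ PySem.Str.replace search_term " " "_",
      "https://stackoverflow.com/search?q=" ++ PySem.Str.replace search_term " " "+",
      "https://github.com/search?q=" ++ PySem.Str.replace search_term " " "+",
      "https://docs.python.org/3/search.html?q=" ++ PySem.Str.replace search_term " " "+",
      "https://developer.mozilla.org/en-US/search?q=" ++ PySem.Str.replace search_term " " "+",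
      "https://www.reddit.com/search/?q=" ++ PySem.Str.replace search_term " " "+",
      "https://medium.com/search?q=" ++ PySem.Str.replace search_term " " "+",
      "https://dev.to/search?q=" ++ PySem.Str.replace search_term " " "+",
      "https://www.geeksforgeeks.org/" ++ PySem.Str.replace search_term " " "-",
      "https://towardsdatascience.com/search?q=" ++ PySem.Str.replace search_term " " "+",
      "https://www.kaggle.com/search?q=" ++ PySem.Str.replace search_term " " "+",
      "https://arxiv.org/search/?query=" ++ PySem.Str.replace search_term " " "+",
      "https://huggingface.co/search/full-text?q=" ++ PySem.Str.replace search_term " " "+",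
      "https://openai.com/search/?query=" ++ PySem.Str.replace search_term " " "+",
      "https://www.tensorflow.org/s/results?q=" ++ PySem.Str.replace search_term " " "+" ]
  else if (["recipe", "cooking", "food", "apple", "apples", "cake", "chicken", "pasta"].any
      (fun term => PySem.Str.isIn term search_lower)) then
    [ "https://en.wikipedia.org/wiki/" ++ PySem.Str.replace search_term " " "_",
      "https://www.allrecipes.com/search/results/?search=" ++ PySem.Str.replace search_term " " "+",
      "https://www.foodnetwork.com/search/" ++ PySem.Str.replace search_term " " "-",
      "https://www.epicurious.com/search/" ++ PySem.Str.replace search_term " " "%20",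
      "https://www.bbcgoodfood.com/search/recipes?query=" ++ PySem.Str.replace search_term " " "+",
      "https://www.delish.com/search/?q=" ++ PySem.Str.replace search_term " " "+",
      "https://www.taste.com.au/search?q=" ++ PySem.Str.replace search_term " " "+",
      "https://www.bonappetit.com/search?q=" ++ PySem.Str.replace search_term " " "+",
      "https://www.foodandwine.com/search?q=" ++ PySem.Str.replace search_term " " "+",
      "https://www.simplyrecipes.com/search?q=" ++ PySem.Str.replace search_term " " "+",
      "https://www.kitchn.com/search?q=" ++ PySem.Str.replace search_term " " "+",
      "https://www.seriouseats.com/search?q=" ++ PySem.Str.replace search_term " " "+",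
      "https://www.marthastewart.com/search?q=" ++ PySem.Str.replace search_term " " "+",
      "https://www.recipetineats.com/?s=" ++ PySem.Str.replace search_term " " "+",
      "https://www.tasteofhome.com/search/?q=" ++ PySem.Str.replace search_term " " "+" ]
  else if (["health", "medicine", "disease", "treatment", "symptoms"].any
      (fun term => PySem.Str.isIn term search_lower)) then
    [ "https://en.wikipedia.org/wiki/" ++ PySem.Str.replace search_term " " "_",
      "https://www.mayoclinic.org/search/search-results?q=" ++ PySem.Str.replace search_term " " "+",
      "https://www.webmd.com/search/search_results/default.aspx?query=" ++ PySem.Str.replace search_term " " "+",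
      "https://medlineplus.gov/search/?query=" ++ PySem.Str.replace search_term " " "+",
      "https://www.healthline.com/search?q1=" ++ PySem.Str.replace search_term " " "+",
      "https://www.medicalnewstoday.com/search?q=" ++ PySem.Str.replace search_term " " "+",
      "https://www.health.com/search?q=" ++ PySem.Str.replace search_term " " "+",
      "https://www.verywellhealth.com/search?q=" ++ PySem.Str.replace search_term " " "+",
      "https://www.nhs.uk/search/?q=" ++ PySem.Str.replace search_term " " "+",
      "https://www.drugs.com/search.php?searchterm=" ++ PySem.Str.replace search_term " " "+",
      "https://www.everydayhealth.com/search/?q=" ++ PySem.Str.replace search_term " " "+",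
      "https://www.prevention.com/search/?q=" ++ PySem.Str.replace search_term " " "+",
      "https://www.womenshealthmag.com/search/?q=" ++ PySem.Str.replace search_term " " "+",
      "https://www.menshealth.com/search/?q=" ++ PySem.Str.replace search_term " " "+",
      "https://www.healthcentral.com/search?q=" ++ PySem.Str.replace search_term " " "+" ]
  else
    [ "https://en.wikipedia.org/wiki/" ++ PySem.Str.replace search_term " " "_",
      "https://www.britannica.com/search?query=" ++ PySem.Str.replace search_term " " "+",
      "https://www.reddit.com/search/?q=" ++ PySem.Str.replace search_term " " "+",
      "https://www.quora.com/search?q=" ++ PySem.Str.replace search_term " " "+",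
      "https://medium.com/search?q=" ++ PySem.Str.replace search_term " " "+",
      "https://scholar.google.com/scholar?q=" ++ PySem.Str.replace search_term " " "+",
      "https://www.youtube.com/results?search_query=" ++ PySem.Str.replace search_term " " "+",
      "https://www.coursera.org/search?query=" ++ PySem.Str.replace search_term " " "%20",
      "https://www.udemy.com/courses/search/?q=" ++ PySem.Str.replace search_term " " "+",
      "https://www.khanacademy.org/search?page_search_query=" ++ PySem.Str.replace search_term " " "+",
      "https://www.ted.com/search?q=" ++ PySem.Str.replace search_term " " "+",
      "https://www.investopedia.com/search?q=" ++ PySem.Str.replace search_term " " "+",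
      "https://www.howstuffworks.com/search.php?terms=" ++ PySem.Str.replace search_term " " "+",
      "https://www.nationalgeographic.com/search?q=" ++ PySem.Str.replace search_term " " "+",
      "https://www.smithsonianmag.com/search/?q=" ++ PySem.Str.replace search_term " " "+" ]

-- ===== PORT B =====
-- _KW2CAT (string keys ported as their code-point lists)
def pvKw2Cat : PySem.Dict (List Char) Nat := PySem.Dict.mk
  [ ("python".toList, 0), ("javascript".toList, 0), ("programming".toList, 0), ("coding".toList, 0),
    ("llm".toList, 0), ("ai".toList, 0), ("machine learning".toList, 0), ("software".toList, 0),
    ("recipe".toList, 1), ("cooking".toList, 1), ("food".toList, 1), ("apple".toList, 1),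
    ("apples".toList, 1), ("cake".toList, 1), ("chicken".toList, 1), ("pasta".toList, 1),
    ("health".toList, 2), ("medicine".toList, 2), ("disease".toList, 2), ("treatment".toList, 2),
    ("symptoms".toList, 2) ]

-- _TABLES
def pvTables : List (List (String × String)) :=
  [ [ ("https://en.wikipedia.org/wiki/", "_"),
      ("https://stackoverflow.com/search?q=", "+"),
      ("https://github.com/search?q=", "+"),
      ("https://docs.python.org/3/search.html?q=", "+"),
      ("https://developer.mozilla.org/en-US/search?q=", "+"),
      ("https://www.reddit.com/search/?q=", "+"),
      ("https://medium.com/search?q=", "+"),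
      ("https://dev.to/search?q=", "+"),
      ("https://www.geeksforgeeks.org/", "-"),
      ("https://towardsdatascience.com/search?q=", "+"),
      ("https://www.kaggle.com/search?q=", "+"),
      ("https://arxiv.org/search/?query=", "+"),
      ("https://huggingface.co/search/full-text?q=", "+"),
      ("https://openai.com/search/?query=", "+"),
      ("https://www.tensorflow.org/s/results?q=", "+") ],
    [ ("https://en.wikipedia.org/wiki/", "_"),
      ("https://www.allrecipes.com/search/results/?search=", "+"),
      ("https://www.foodnetwork.com/search/", "-"),
      ("https://www.epicurious.com/search/", "%20"),
      ("https://www.bbcgoodfood.com/search/recipes?query=", "+"),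
      ("https://www.delish.com/search/?q=", "+"),
      ("https://www.taste.com.au/search?q=", "+"),
      ("https://www.bonappetit.com/search?q=", "+"),
      ("https://www.foodandwine.com/search?q=", "+"),
      ("https://www.simplyrecipes.com/search?q=", "+"),
      ("https://www.kitchn.com/search?q=", "+"),
      ("https://www.seriouseats.com/search?q=", "+"),
      ("https://www.marthastewart.com/search?q=", "+"),
      ("https://www.recipetineats.com/?s=", "+"),
      ("https://www.tasteofhome.com/search/?q=", "+") ],
    [ ("https://en.wikipedia.org/wiki/", "_"),
      ("https://www.mayoclinic.org/search/search-results?q=", "+"),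
      ("https://www.webmd.com/search/search_results/default.aspx?query=", "+"),
      ("https://medlineplus.gov/search/?query=", "+"),
      ("https://www.healthline.com/search?q1=", "+"),
      ("https://www.medicalnewstoday.com/search?q=", "+"),
      ("https://www.health.com/search?q=", "+"),
      ("https://www.verywellhealth.com/search?q=", "+"),
      ("https://www.nhs.uk/search/?q=", "+"),
      ("https://www.drugs.com/search.php?searchterm=", "+"),
      ("https://www.everydayhealth.com/search/?q=", "+"),
      ("https://www.prevention.com/search/?q=", "+"),
      ("https://www.womenshealthmag.com/search/?q=", "+"),
      ("https://www.menshealth.com/search/?q=", "+"),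
      ("https://www.healthcentral.com/search?q=", "+") ],
    [ ("https://en.wikipedia.org/wiki/", "_"),
      ("https://www.britannica.com/search?query=", "+"),
      ("https://www.reddit.com/search/?q=", "+"),
      ("https://www.quora.com/search?q=", "+"),
      ("https://medium.com/search?q=", "+"),
      ("https://scholar.google.com/scholar?q=", "+"),
      ("https://www.youtube.com/results?search_query=", "+"),
      ("https://www.coursera.org/search?query=", "%20"),
      ("https://www.udemy.com/courses/search/?q=", "+"),
      ("https://www.khanacademy.org/search?page_search_query=", "+"),
      ("https://www.ted.com/search?q=", "+"),
      ("https://www.investopedia.com/search?q=", "+"),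
      ("https://www.howstuffworks.com/search.php?terms=", "+"),
      ("https://www.nationalgeographic.com/search?q=", "+"),
      ("https://www.smithsonianmag.com/search/?q=", "+") ] ]

-- inner loop: for j in range(i+1, min(i+16, len(sl))+1): c = _KW2CAT.get(sl[i:j]); if c is not None: cat = min(cat, c)
def pvInner (L : List Char) (i : Nat) (cat : Nat) : Nat :=
  (List.range' (i + 1) (min (i + 16) L.length + 1 - (i + 1))).foldl
    (fun (cat : Nat) (j : Nat) =>
      match PySem.Dict.get? pvKw2Cat (PySem.List.slice L (some (i : Int)) (some (j : Int))) with
      | some c => min cat c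
      | none => cat) cat

-- outer loop: for i in range(len(sl)), starting with cat = 3
def pvCatOf (L : List Char) : Nat :=
  (List.range L.length).foldl (fun cat i => pvInner L i cat) 3

def get_fallback_urls_alt (search_term : String) : List String :=
  let sl := PySem.Str.lower search_term
  let cat := pvCatOf sl.toList
  let variants : PySem.Dict String String := PySem.Dict.mk
    [ ("_", PySem.Str.replace search_term " " "_"),
      ("+", PySem.Str.replace search_term " " "+"),
      ("-", PySem.Str.replace search_term " " "-"),
      ("%20", PySem.Str.replace search_term " " "%20") ]
  -- cat < 4 and every table key is a variants key, so the Python indexings never raise;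
  -- the getD defaults are never taken
  (pvTables.getD cat []).map (fun e => e.1 ++ PySem.Dict.getD variants e.2 "")

-- ===== PRECONDITION & SPEC =====
def Spec_get_fallback_urls (search_term : String) (out : List String) : Prop := out = get_fallback_urls_alt search_term
instance (search_term : String) (out : List String) : Decidable (Spec_get_fallback_urls search_term out) := by unfold Spec_get_fallback_urls; infer_instance

-- ===== CLAIM =====
def Claim_equal_get_fallback_urls : Prop := ∀ (search_term : String), Dom_get_fallback_urls search_term → Spec_get_fallback_urls search_term (get_fallback_urls search_term)

-- ===== LEMMAS AND PROOFS =====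

-- the keyword lists per category
def pvKeys : Nat → List (List Char)
  | 0 => [ "python".toList, "javascript".toList, "programming".toList, "coding".toList,
           "llm".toList, "ai".toList, "machine learning".toList, "software".toList ]
  | 1 => [ "recipe".toList, "cooking".toList, "food".toList, "apple".toList,
           "apples".toList, "cake".toList, "chicken".toList, "pasta".toList ]
  | 2 => [ "health".toList, "medicine".toList, "disease".toList, "treatment".toList,
           "symptoms".toList ]
  | _ => []

lemma pvNodupKeys : pvKw2Cat.keys.Nodup := by decide

lemma pvLookup_iff (w : List Char) (c : Nat) :
    PySem.Dict.get? pvKw2Cat w = some c ↔ w ∈ pvKeys c := by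
  rw [PySem.Dict.get?_eq_some_iff_mem_items _ _ _ pvNodupKeys]
  match c with
  | 0 => simp [pvKw2Cat, pvKeys, Prod.ext_iff]
  | 1 => simp [pvKw2Cat, pvKeys, Prod.ext_iff]
  | 2 => simp [pvKw2Cat, pvKeys, Prod.ext_iff]
  | (n+3) =>
    constructor
    · intro h
      exfalso
      have hc : n + 3 ∈ pvKw2Cat.items.map Prod.snd := List.mem_map_of_mem h
      simp [pvKw2Cat] at hc
    · intro h
      simp [pvKeys] at h

lemma pvKeys_len (c : Nat) (kw : List Char) (h : kw ∈ pvKeys c) :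
    kw ≠ [] ∧ kw.length ≤ 16 := by
  match c with
  | 0 => simp [pvKeys, List.mem_cons] at h; rcases h with rfl|rfl|rfl|rfl|rfl|rfl|rfl|rfl <;> decide
  | 1 => simp [pvKeys, List.mem_cons] at h; rcases h with rfl|rfl|rfl|rfl|rfl|rfl|rfl|rfl <;> decide
  | 2 => simp [pvKeys, List.mem_cons] at h; rcases h with rfl|rfl|rfl|rfl|rfl <;> decide
  | (n+3) => simp [pvKeys] at h

-- every hit value produced by the window scan
def pvWinHits (L : List Char) : List Nat :=
  (List.range L.length).flatMap (fun i =>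
    (List.range' (i + 1) (min (i + 16) L.length + 1 - (i + 1))).filterMap
      (fun j => PySem.Dict.get? pvKw2Cat ((L.drop i).take (j - i))))

lemma pvFold_match_min {α : Type} (h : α → Option Nat) (l : List α) (a : Nat) :
    l.foldl (fun cat j => match h j with | some c => min cat c | none => cat) a
      = (l.filterMap h).foldl min a := by
  induction l generalizing a with
  | nil => rfl
  | cons x t ih =>
    simp only [List.foldl_cons, List.filterMap_cons]
    cases h x <;> simp [ih]

lemma pvFold_min_flatMap {α : Type} (g : α → List Nat) (l : List α) (a : Nat) :
    l.foldl (fun acc x => (g x).foldl min acc) a = (l.flatMap g).foldl min a := by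
  induction l generalizing a with
  | nil => rfl
  | cons x t ih => simp [List.flatMap_cons, List.foldl_append, ih]

lemma pvCatOf_eq (L : List Char) : pvCatOf L = (pvWinHits L).foldl min 3 := by
  unfold pvCatOf pvWinHits pvInner
  rw [← pvFold_min_flatMap]
  apply PySem.List.foldl_congr_mem
  intro acc i _
  rw [pvFold_match_min]
  congr 1
  apply List.filterMap_congr
  intro j hj
  rw [PySem.List.slice_natCast]

lemma pvMemHits (L : List Char) (c : Nat) :
    c ∈ pvWinHits L ↔ ∃ kw ∈ pvKeys c, kw <:+: L := by
  constructor
  · intro h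
    simp only [pvWinHits, List.mem_flatMap, List.mem_filterMap] at h
    obtain ⟨i, _, j, _, hget⟩ := h
    exact ⟨_, (pvLookup_iff _ _).mp hget,
      ((List.take_prefix _ _).isInfix).trans (List.drop_suffix _ _).isInfix⟩
  · rintro ⟨kw, hkw, hinf⟩
    obtain ⟨hne, h16⟩ := pvKeys_len c kw hkw
    obtain ⟨u, v, huv⟩ := hinf
    have hkpos : 0 < kw.length :=
      Nat.pos_of_ne_zero (fun h => hne (List.eq_nil_of_length_eq_zero h))
    have hlen : L.length = u.length + kw.length + v.length := by
      have := congrArg List.length huv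
      simp [List.length_append] at this
      omega
    simp only [pvWinHits, List.mem_flatMap, List.mem_filterMap, List.mem_range,
      List.mem_range'_1]
    refine ⟨u.length, by omega, u.length + kw.length, ⟨by omega, by omega⟩, ?_⟩
    have hdrop : L.drop u.length = kw ++ v := by
      rw [← huv, List.append_assoc, List.drop_left]
    have hsub : u.length + kw.length - u.length = kw.length := by omega
    rw [hsub, hdrop, List.take_left]
    exact (pvLookup_iff _ _).mpr hkw

-- the A-side `any` tests, as "some keyword of the category is an infix" statements
lemma pvC0_iff (sl : String) :
    ((["python", "javascript", "programming", "coding", "llm", "ai", "machine learning",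
       "software"] : List String).any (fun term => PySem.Str.isIn term sl)) = true ↔
      ∃ kw ∈ pvKeys 0, kw <:+: sl.toList := by
  simp [PySem.Chars.isIn_iff_infix, pvKeys]

lemma pvC1_iff (sl : String) :
    ((["recipe", "cooking", "food", "apple", "apples", "cake", "chicken", "pasta"] :
       List String).any (fun term => PySem.Str.isIn term sl)) = true ↔
      ∃ kw ∈ pvKeys 1, kw <:+: sl.toList := by
  simp [PySem.Chars.isIn_iff_infix, pvKeys]

lemma pvC2_iff (sl : String) :
    ((["health", "medicine", "disease", "treatment", "symptoms"] :
       List String).any (fun term => PySem.Str.isIn term sl)) = true ↔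
      ∃ kw ∈ pvKeys 2, kw <:+: sl.toList := by
  simp [PySem.Chars.isIn_iff_infix, pvKeys]

-- ===== VERDICT =====
theorem get_fallback_urls_spec : Claim_equal_get_fallback_urls := by
  intro s _
  unfold Spec_get_fallback_urls
  simp only [get_fallback_urls, get_fallback_urls_alt]
  rw [pvCatOf_eq]
  obtain ⟨hM3, hMle⟩ := PySem.List.foldl_min_le (pvWinHits (PySem.Str.lower s).toList) 3
  have hMmem := PySem.List.foldl_min_mem (pvWinHits (PySem.Str.lower s).toList) 3
  set L := (PySem.Str.lower s).toList with hL
  set M := (pvWinHits L).foldl min 3 with hMdef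
  by_cases h0 : ((["python", "javascript", "programming", "coding", "llm", "ai",
      "machine learning", "software"] : List String).any
      (fun term => PySem.Str.isIn term (PySem.Str.lower s))) = true
  · have hm : M = 0 :=
      Nat.le_zero.mp (hMle 0 ((pvMemHits L 0).mpr ((pvC0_iff _).mp h0)))
    simp only [h0, if_true, hm]
    simp [pvTables, PySem.Dict.getD_eq_get?_getD, PySem.Dict.get?_mk_cons]
  · have hmem0 : 0 ∉ pvWinHits L :=
      fun hh => h0 ((pvC0_iff _).mpr ((pvMemHits L 0).mp hh))
    by_cases h1 : ((["recipe", "cooking", "food", "apple", "apples", "cake", "chicken",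
        "pasta"] : List String).any
        (fun term => PySem.Str.isIn term (PySem.Str.lower s))) = true
    · have hle : M ≤ 1 := hMle 1 ((pvMemHits L 1).mpr ((pvC1_iff _).mp h1))
      have hm : M = 1 := by
        rcases hMmem with h3 | hm
        · omega
        · have : M ≠ 0 := fun h => hmem0 (h ▸ hm)
          omega
      simp only [h0, h1, if_true, hm]
      simp [pvTables, PySem.Dict.getD_eq_get?_getD, PySem.Dict.get?_mk_cons]
    · have hmem1 : 1 ∉ pvWinHits L :=
        fun hh => h1 ((pvC1_iff _).mpr ((pvMemHits L 1).mp hh))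
      by_cases h2 : ((["health", "medicine", "disease", "treatment", "symptoms"] :
          List String).any
          (fun term => PySem.Str.isIn term (PySem.Str.lower s))) = true
      · have hle : M ≤ 2 := hMle 2 ((pvMemHits L 2).mpr ((pvC2_iff _).mp h2))
        have hm : M = 2 := by
          rcases hMmem with h3 | hm
          · omega
          · have hn0 : M ≠ 0 := fun h => hmem0 (h ▸ hm)
            have hn1 : M ≠ 1 := fun h => hmem1 (h ▸ hm)
            omega
        simp only [h0, h1, h2, if_true, hm]
        simp [pvTables, PySem.Dict.getD_eq_get?_getD, PySem.Dict.get?_mk_cons]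
      · have hmem2 : 2 ∉ pvWinHits L :=
          fun hh => h2 ((pvC2_iff _).mpr ((pvMemHits L 2).mp hh))
        have hm : M = 3 := by
          rcases hMmem with h3 | hm
          · exact h3
          · exfalso
            obtain ⟨kw, hkw, _⟩ := (pvMemHits L M).mp hm
            interval_cases M
            · exact hmem0 hm
            · exact hmem1 hm
            · exact hmem2 hm
            · simp [pvKeys] at hkw
        simp only [h0, h1, h2, hm]
        simp [pvTables, PySem.Dict.getD_eq_get?_getD, PySem.Dict.get?_mk_cons]
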